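-- pv_equiv track=rewrite | github.com/teddyy279/Python | Hàm/Problem29 Số thuận nghịch, lộc phát.py | check_palindrome_number
-- ===== SOURCE A (Python) =====
-- def check_palindrome_number(n):
--     original = n
--     res = 0
--     cnt = 0
--     while n != 0:
--         tmp = n % 10
--         if(tmp == 6): cnt = 1
--         res = res * 10 + tmp
--         n //= 10
--     return original == res and cnt == 1
-- ===== SOURCE B (Python) =====
-- def check_palindrome_number(n):
--     s = str(n)
--     return s == s[::-1] and '6' in s
-- ===== Notes on version B (the rewrite author's own statement) =====
-- stated objective: idiomatic
-- what changed: Replaces A's arithmetic digit-reversal while-loop (accumulating the reversed number and a seen-6 flag) with the idiomatic string form: s = str(n), then s == s[::-1] for the palindrome test and '6' in s for the digit test; Pre_ excludes negative n, on which A's loop never terminates (n //= 10 stalls at -1).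
import Mathlib
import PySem

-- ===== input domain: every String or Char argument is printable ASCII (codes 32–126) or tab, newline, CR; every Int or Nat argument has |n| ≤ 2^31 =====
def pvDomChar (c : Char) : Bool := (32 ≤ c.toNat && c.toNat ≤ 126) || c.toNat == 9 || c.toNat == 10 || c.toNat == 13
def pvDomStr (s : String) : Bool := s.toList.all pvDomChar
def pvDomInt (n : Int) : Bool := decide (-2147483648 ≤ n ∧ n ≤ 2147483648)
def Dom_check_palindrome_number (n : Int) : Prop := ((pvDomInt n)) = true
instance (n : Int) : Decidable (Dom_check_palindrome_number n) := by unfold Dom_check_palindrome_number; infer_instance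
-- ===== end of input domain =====

-- B replaces A's arithmetic digit-reversal loop with the idiomatic string form
-- (s == s[::-1] and '6' in s); equivalence is proved on n ≥ 0 (A's loop never terminates on n < 0).

-- ===== PORT A =====
-- A's `while n != 0` loop; the `0 < n` guard totalizes it: for n < 0 Python's loop never
-- terminates (such n are outside Pre_), and for n ≥ 0 the two conditions agree step by step.
def pvLoopA (n res cnt : Int) : Int × Int :=
  if h : 0 < n then
    let tmp := PySem.Int.mod n 10
    pvLoopA (PySem.Int.floordiv n 10) (res * 10 + tmp) (if tmp == 6 then 1 else cnt)
  else (res, cnt)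
termination_by n.toNat
decreasing_by
  rw [PySem.Int.floordiv_eq_ediv_of_pos (by omega : (0:Int) < 10)]
  omega

def check_palindrome_number (n : Int) : Bool :=
  let p := pvLoopA n 0 0
  decide (n = p.1) && decide (p.2 = 1)

-- ===== PORT B =====
def check_palindrome_number_alt (n : Int) : Bool :=
  let s := PySem.Int.toChars n                                      -- s = str(n)
  decide (PySem.List.slice? s none none (-1) = some s)              -- s == s[::-1]
    && PySem.Chars.isIn ['6'] s                                     -- '6' in s

-- ===== PRECONDITION & SPEC =====
-- Pre_ excludes negative n: there A's while-loop never terminates (n //= 10 stalls at -1),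
-- so A returns no value; B returns a value on all integers.
def Pre_check_palindrome_number (n : Int) : Prop := 0 ≤ n
instance (n : Int) : Decidable (Pre_check_palindrome_number n) := by unfold Pre_check_palindrome_number; infer_instance
def pvWitness_check_palindrome_number : Int := (66)

def Spec_check_palindrome_number (n : Int) (out : Bool) : Prop := out = check_palindrome_number_alt n
instance (n : Int) (out : Bool) : Decidable (Spec_check_palindrome_number n out) := by unfold Spec_check_palindrome_number; infer_instance

-- ===== CLAIM (what is proved, stated in full; the proofs are below) =====
def Claim_equal_check_palindrome_number : Prop := ∀ (n : Int), Dom_check_palindrome_number n → Pre_check_palindrome_number n → Spec_check_palindrome_number n (check_palindrome_number n)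

-- ===== LEMMAS AND PROOFS =====

-- Characterisation of core's printing routine on positive n (used for str(n) in port B).
lemma pvToDigitsCore_eq (f : ℕ) : ∀ (n : ℕ) (acc : List Char), 0 < n → n < f →
    Nat.toDigitsCore 10 f n acc = ((Nat.digits 10 n).map Nat.digitChar).reverse ++ acc := by
  induction f with
  | zero => intro n acc hn hf; omega
  | succ f ih =>
    intro n acc hn hf
    rw [Nat.toDigitsCore]
    rw [Nat.digits_def' (by norm_num : (1:ℕ) < 10) hn]
    by_cases h10 : n / 10 = 0
    · simp [h10]
    · rw [if_neg h10, ih (n / 10) _ (Nat.pos_of_ne_zero h10) (by omega)]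
      simp

lemma pvToDigits_eq (m : ℕ) (hm : 0 < m) :
    Nat.toDigits 10 m = ((Nat.digits 10 m).map Nat.digitChar).reverse := by
  rw [Nat.toDigits, pvToDigitsCore_eq (m + 1) m [] hm (by omega)]
  simp

-- Invariant of A's loop on a natural-number argument.
lemma pvLoopA_eq (m : ℕ) : ∀ (res cnt : Int), pvLoopA (m : Int) res cnt =
    (res * 10 ^ (Nat.digits 10 m).length + ((Nat.ofDigits 10 (Nat.digits 10 m).reverse : ℕ) : Int),
     if 6 ∈ Nat.digits 10 m then 1 else cnt) := by
  induction m using Nat.strong_induction_on with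
  | _ m ih =>
    intro res cnt
    rcases Nat.eq_zero_or_pos m with hm | hm
    · subst hm
      rw [pvLoopA]
      simp
    · rw [pvLoopA, dif_pos (by exact_mod_cast hm)]
      have hmod : PySem.Int.mod (m : Int) 10 = ((m % 10 : ℕ) : ℤ) := by
        exact_mod_cast PySem.Int.mod_natCast m 10
      have hdiv : PySem.Int.floordiv (m : Int) 10 = ((m / 10 : ℕ) : ℤ) := by
        exact_mod_cast PySem.Int.floordiv_natCast m 10
      simp only [hmod, hdiv]
      rw [ih (m / 10) (by omega)]
      rw [Nat.digits_def' (by norm_num : (1:ℕ) < 10) hm]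
      rw [Prod.mk.injEq]
      constructor
      · rw [List.reverse_cons, Nat.ofDigits_append, Nat.ofDigits_singleton]
        simp only [List.length_cons, List.length_reverse]
        push_cast
        ring
      · have hbeq : (((m % 10 : ℕ) : ℤ) == 6) = decide (m % 10 = 6) := by
          by_cases h : m % 10 = 6
          · rw [h, decide_eq_true rfl]
            norm_num
          · have h' : ((m % 10 : ℕ) : ℤ) ≠ 6 := by exact_mod_cast h
            rw [beq_eq_false_iff_ne.mpr h', decide_eq_false h]
        rw [hbeq]
        by_cases h6 : (6:ℕ) ∈ Nat.digits 10 (m / 10) <;>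
          by_cases h6' : m % 10 = 6 <;>
          (simp [h6, h6', List.mem_cons]; try omega)

lemma pvMapDigitChar_inj : ∀ (L1 L2 : List ℕ), (∀ x ∈ L1, x < 10) → (∀ x ∈ L2, x < 10) →
    L1.map Nat.digitChar = L2.map Nat.digitChar → L1 = L2 := by
  have key : ∀ a, a < 10 → ∀ b, b < 10 → Nat.digitChar a = Nat.digitChar b → a = b := by decide
  intro L1
  induction L1 with
  | nil => intro L2 _ _ h; cases L2 <;> simp_all
  | cons a t ih =>
    intro L2 h1 h2 h
    cases L2 with
    | nil => simp_all
    | cons b u =>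
      simp only [List.map_cons, List.cons.injEq] at h
      have := key a (h1 a (by simp)) b (h2 b (by simp)) h.1
      have := ih u (fun x hx => h1 x (by simp [hx])) (fun x hx => h2 x (by simp [hx])) h.2
      simp_all

lemma pvDigitChar_six : ∀ d, d < 10 → (Nat.digitChar d = '6' ↔ d = 6) := by decide

-- the two sides of B, as propositions about the digit list of m
lemma pvPal_iff (m : ℕ) :
    ((m : ℤ) = ((Nat.ofDigits 10 (Nat.digits 10 m).reverse : ℕ) : ℤ)) ↔
      ((Nat.digits 10 m).map Nat.digitChar).reverse.reverse =
        ((Nat.digits 10 m).map Nat.digitChar).reverse := by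
  have hD : ∀ x ∈ Nat.digits 10 m, x < 10 := fun x hx => Nat.digits_lt_base (by norm_num) hx
  have hDr : ∀ x ∈ (Nat.digits 10 m).reverse, x < 10 := fun x hx => hD x (List.mem_reverse.mp hx)
  rw [Nat.cast_inj, List.reverse_reverse]
  constructor
  · intro h
    have h1 : Nat.ofDigits 10 (Nat.digits 10 m) = Nat.ofDigits 10 (Nat.digits 10 m).reverse := by
      rw [Nat.ofDigits_digits]; exact h
    have h2 : Nat.digits 10 m = (Nat.digits 10 m).reverse :=
      Nat.ofDigits_inj_of_len_eq (by norm_num) (by simp) hD hDr h1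
    calc (Nat.digits 10 m).map Nat.digitChar
        = ((Nat.digits 10 m).reverse).map Nat.digitChar := by rw [← h2]
      _ = ((Nat.digits 10 m).map Nat.digitChar).reverse := by rw [List.map_reverse]
  · intro h
    have h2 : Nat.digits 10 m = (Nat.digits 10 m).reverse := by
      apply pvMapDigitChar_inj _ _ hD hDr
      rw [h, List.map_reverse]
    conv_lhs => rw [← Nat.ofDigits_digits 10 m]
    rw [← h2]

lemma pvSix_iff (m : ℕ) :
    '6' ∈ ((Nat.digits 10 m).map Nat.digitChar).reverse ↔ 6 ∈ Nat.digits 10 m := by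
  have hD : ∀ x ∈ Nat.digits 10 m, x < 10 := fun x hx => Nat.digits_lt_base (by norm_num) hx
  rw [List.mem_reverse, List.mem_map]
  constructor
  · rintro ⟨d, hd, hdc⟩
    have h6 := (pvDigitChar_six d (hD d hd)).mp hdc
    exact h6 ▸ hd
  · intro h
    exact ⟨6, h, rfl⟩

-- ===== VERDICT (by name: the statement is the Claim_ definition above) =====
theorem check_palindrome_number_spec : Claim_equal_check_palindrome_number := by
  intro n _ hpre
  unfold Spec_check_palindrome_number
  lift n to ℕ using hpre with m
  rcases Nat.eq_zero_or_pos m with rfl | hm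
  · have hA : check_palindrome_number ((0 : ℕ) : ℤ) = false := by
      rw [check_palindrome_number, Nat.cast_zero, show ((0:ℤ)) = ((0:ℕ):ℤ) from rfl,
        pvLoopA_eq 0]
      simp
    rw [hA]
    decide
  · have hs : PySem.Int.toChars (m : ℤ) = ((Nat.digits 10 m).map Nat.digitChar).reverse := by
      rw [PySem.Int.toChars, if_neg (by omega), Int.toNat_natCast, pvToDigits_eq m hm]
    rw [check_palindrome_number, check_palindrome_number_alt, pvLoopA_eq m, hs,
      PySem.List.slice?_none_none_neg_one]
    rw [Bool.eq_iff_iff]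
    simp only [Bool.and_eq_true, decide_eq_true_eq, zero_mul, zero_add,
      Option.some.injEq, PySem.Chars.isIn_iff_infix, List.singleton_infix_iff]
    constructor <;> rintro ⟨h1, h2⟩
    · refine ⟨(pvPal_iff m).mp h1, ?_⟩
      exact (pvSix_iff m).mpr (by simpa using h2)
    · refine ⟨(pvPal_iff m).mpr h1, ?_⟩
      have := (pvSix_iff m).mp h2
      simp [this]
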